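-- pv_equiv track=rewrite | github.com/damianoazzolini/gentians | gentians/utils.py | is_valid_arithm_rule
-- ===== SOURCE A (Python) =====
-- def get_v0_v1_v2_arithm(rule : str, p : int) -> 'tuple[str,str,str]':
--     '''
--     From V0+V1=V2 returns V0 V1 V2
--     IMPORTANT: I suppose that there cannot be more than 10 variables: in this
--     case, this does not work since every variable is no more of 2 chars (e.g., V10)
--     '''
--     v0 = rule[p-2:p]
--     v1 = rule[p+1:p+3]
--     v2 = rule[p+4:p+6]
--     return v0 ,v1, v2
--
-- def is_valid_arithm_rule(rule : str) -> bool: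
--     '''
--     Hardcoded rules to remove arithm nonsense.
--     '''
--     arithm = ['+','-','*','/']
--     rule = rule.replace(' ','').replace(':-','_')
--     for ch in arithm:
--         pos = [pos for pos, char in enumerate(rule) if char == ch]
--         if len(pos) > 0:
--             for p in pos:
--                 v0, v1, v2 = get_v0_v1_v2_arithm(rule,p)
--                 # if v0 == v1 or v0 == v2 or v1 == v2:
--                 if v0 == v2 or v1 == v2: # v0 and v1 can be the same, V0 + V0 = V1 is valid
--                     return False
--     return True
-- ===== SOURCE B (Python) =====
-- def is_valid_arithm_rule(rule : str) -> bool: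
--     '''
--     Hardcoded rules to remove arithm nonsense: single forward pass.
--     '''
--     rule = rule.replace(' ','').replace(':-','_')
--     for i, char in enumerate(rule):
--         if char in '+-*/':
--             if rule[i-2:i] == rule[i+4:i+6] or rule[i+1:i+3] == rule[i+4:i+6]:
--                 return False
--     return True
-- ===== Notes on version B (the rewrite author's own statement) =====
-- stated objective: faster
-- what changed: Replaces A's four per-operator passes (each building a position list with an enumerate comprehension, then a second loop over the positions calling a slicing helper) with one forward scan over enumerate(rule) that tests operator membership and the two slice equalities inline; the helper and the intermediate position lists disappear (one pass, no list allocation).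
import Mathlib
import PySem

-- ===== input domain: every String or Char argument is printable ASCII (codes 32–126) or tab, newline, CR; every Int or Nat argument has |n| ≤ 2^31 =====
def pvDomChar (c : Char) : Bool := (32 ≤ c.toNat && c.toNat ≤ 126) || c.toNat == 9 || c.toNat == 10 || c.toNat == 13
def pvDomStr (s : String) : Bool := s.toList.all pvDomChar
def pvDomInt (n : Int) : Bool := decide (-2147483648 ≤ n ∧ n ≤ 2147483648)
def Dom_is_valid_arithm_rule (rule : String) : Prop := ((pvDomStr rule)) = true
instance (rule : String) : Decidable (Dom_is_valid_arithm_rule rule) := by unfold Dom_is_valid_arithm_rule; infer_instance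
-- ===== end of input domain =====

-- B replaces A's four per-operator scans (position-list comprehension + inner loop + slicing
-- helper) with a single forward pass over enumerate(rule) testing everything inline; objective: simpler.


-- ===== PORT A =====
-- rule.replace(' ','').replace(':-','_')  (shared normalisation step of both Pythons)
def pvNorm (rule : String) : List Char :=
  PySem.Chars.replace (PySem.Chars.replace rule.toList [' '] []) [':', '-'] ['_']

-- helper get_v0_v1_v2_arithm: rule[p-2:p], rule[p+1:p+3], rule[p+4:p+6]
def get_v0_v1_v2_arithm (rule : List Char) (p : Int) :
    List Char × List Char × List Char :=
  (PySem.List.slice rule (some (p - 2)) (some p),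
   PySem.List.slice rule (some (p + 1)) (some (p + 3)),
   PySem.List.slice rule (some (p + 4)) (some (p + 6)))

-- inner 'for p in pos' loop: true iff the 'return False' fires for some p
def pvALoopPos (rule : List Char) : List Int → Bool
  | [] => false
  | p :: ps =>
    let v := get_v0_v1_v2_arithm rule p
    if v.1 == v.2.2 || v.2.1 == v.2.2 then true else pvALoopPos rule ps

-- outer 'for ch in arithm' loop
def pvALoopCh (rule : List Char) : List Char → Bool
  | [] => true
  | ch :: chs =>
    let pos := ((PySem.List.enumerate rule 0).filter (fun pc : Int × Char => pc.2 == ch)).map (·.1)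
    if pos.length > 0 then
      if pvALoopPos rule pos then false else pvALoopCh rule chs
    else pvALoopCh rule chs

def is_valid_arithm_rule (rule : String) : Bool :=
  pvALoopCh (pvNorm rule) ['+', '-', '*', '/']

-- ===== PORT B =====
-- rule[i-2:i] == rule[i+4:i+6] or rule[i+1:i+3] == rule[i+4:i+6], inline
def pvBBad (s : List Char) (i : Int) : Bool :=
  PySem.List.slice s (some (i - 2)) (some i) == PySem.List.slice s (some (i + 4)) (some (i + 6)) ||
  PySem.List.slice s (some (i + 1)) (some (i + 3)) == PySem.List.slice s (some (i + 4)) (some (i + 6))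

-- single 'for i, char in enumerate(rule)' pass
def pvBLoop (s : List Char) : List (Int × Char) → Bool
  | [] => true
  | (i, c) :: rest =>
    if c == '+' || c == '-' || c == '*' || c == '/' then  -- char in '+-*/'
      if pvBBad s i then false else pvBLoop s rest
    else pvBLoop s rest

def is_valid_arithm_rule_alt (rule : String) : Bool :=
  let s := pvNorm rule
  pvBLoop s (PySem.List.enumerate s 0)

-- ===== PRECONDITION & SPEC =====
def Spec_is_valid_arithm_rule (rule : String) (out : Bool) : Prop := out = is_valid_arithm_rule_alt rule
instance (rule : String) (out : Bool) : Decidable (Spec_is_valid_arithm_rule rule out) := by unfold Spec_is_valid_arithm_rule; infer_instance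

-- ===== CLAIM (what is proved, stated in full; the proofs are below) =====
def Claim_equal_is_valid_arithm_rule : Prop := ∀ (rule : String), Dom_is_valid_arithm_rule rule → Spec_is_valid_arithm_rule rule (is_valid_arithm_rule rule)

-- ===== LEMMAS AND PROOFS =====

theorem pvALoopPos_eq_any (rule : List Char) (ps : List Int) :
    pvALoopPos rule ps = ps.any (pvBBad rule) := by
  induction ps with
  | nil => rfl
  | cons p ps ih =>
    simp only [pvALoopPos, get_v0_v1_v2_arithm, List.any_cons, pvBBad]
    split <;> simp_all

-- one step of A's outer loop: the length test collapses (an empty position list has no bad position)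
theorem pvALoopCh_cons (rule : List Char) (ch : Char) (chs : List Char) :
    pvALoopCh rule (ch :: chs) =
      ((!(PySem.List.enumerate rule 0).any
          (fun pc : Int × Char => pc.2 == ch && pvBBad rule pc.1)) && pvALoopCh rule chs) := by
  have hmain : pvALoopPos rule
      (((PySem.List.enumerate rule 0).filter (fun pc : Int × Char => pc.2 == ch)).map (·.1)) =
      (PySem.List.enumerate rule 0).any (fun pc : Int × Char => pc.2 == ch && pvBBad rule pc.1) := by
    rw [pvALoopPos_eq_any, List.any_map, List.any_filter]
    rfl
  show (if (((PySem.List.enumerate rule 0).filter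
        (fun pc : Int × Char => pc.2 == ch)).map (·.1)).length > 0 then
      if pvALoopPos rule (((PySem.List.enumerate rule 0).filter
        (fun pc : Int × Char => pc.2 == ch)).map (·.1)) then false else pvALoopCh rule chs
    else pvALoopCh rule chs) = _
  rw [hmain]
  by_cases hlen : (((PySem.List.enumerate rule 0).filter
      (fun pc : Int × Char => pc.2 == ch)).map (·.1)).length > 0
  · rw [if_pos hlen]
    cases hX : (PySem.List.enumerate rule 0).any
        (fun pc : Int × Char => pc.2 == ch && pvBBad rule pc.1)
    · rw [if_neg (by decide), Bool.not_false, Bool.true_and]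
    · rw [if_pos (by decide), Bool.not_true, Bool.false_and]
  · rw [if_neg hlen]
    have hnil : (PySem.List.enumerate rule 0).filter (fun pc : Int × Char => pc.2 == ch) = [] := by
      rcases List.eq_nil_or_concat ((PySem.List.enumerate rule 0).filter
          (fun pc : Int × Char => pc.2 == ch)) with h | ⟨l, x, h⟩
      · exact h
      · exact absurd (by rw [h]; simp) hlen
    have hfalse : (PySem.List.enumerate rule 0).any
        (fun pc : Int × Char => pc.2 == ch && pvBBad rule pc.1) = false := by
      rw [List.any_eq_false]
      intro x hx
      have hmem := List.filter_eq_nil_iff.mp hnil x hx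
      intro hand
      exact hmem (Bool.and_eq_true .. ▸ hand).1
    rw [hfalse, Bool.not_false, Bool.true_and]

theorem pvALoopCh_iff (rule : List Char) (chs : List Char) :
    pvALoopCh rule chs = true ↔
      ∀ p c, (p, c) ∈ PySem.List.enumerate rule 0 → c ∈ chs → pvBBad rule p = false := by
  induction chs with
  | nil => simp [pvALoopCh]
  | cons ch chs ih =>
    rw [pvALoopCh_cons, Bool.and_eq_true, Bool.not_eq_true', List.any_eq_false, ih]
    constructor
    · rintro ⟨h1, h2⟩ p c hm hc
      rcases List.mem_cons.mp hc with hc1 | hc1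
      · have := h1 (p, c) hm
        simpa [hc1] using this
      · exact h2 p c hm hc1
    · intro h
      refine ⟨?_, fun p c hm hc => h p c hm (List.mem_cons_of_mem _ hc)⟩
      rintro ⟨p, c⟩ hx
      by_cases hc : c = ch
      · have := h p c hx (by rw [hc]; exact List.mem_cons_self ..)
        simp [hc, this]
      · simp [hc]

theorem pvBLoop_iff (s : List Char) (l : List (Int × Char)) :
    pvBLoop s l = true ↔
      ∀ p c, (p, c) ∈ l → (c = '+' ∨ c = '-' ∨ c = '*' ∨ c = '/') → pvBBad s p = false := by
  induction l with
  | nil => simp [pvBLoop]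
  | cons ic rest ih =>
    obtain ⟨i, c⟩ := ic
    simp only [pvBLoop]
    split_ifs with hop hbad
    · refine iff_of_false (by simp) ?_
      intro h
      have hd := h i c (List.mem_cons_self ..) (by simpa [or_assoc] using hop)
      rw [hbad] at hd
      cases hd
    · rw [ih]
      constructor
      · intro h p c' hm hdisj
        rcases List.mem_cons.mp hm with heq | hmem
        · rw [Prod.mk.injEq] at heq
          rw [heq.1]
          exact Bool.eq_false_iff.mpr hbad
        · exact h p c' hmem hdisj
      · exact fun h p c' hm hdisj => h p c' (List.mem_cons_of_mem _ hm) hdisj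
    · rw [ih]
      constructor
      · intro h p c' hm hdisj
        rcases List.mem_cons.mp hm with heq | hmem
        · rw [Prod.mk.injEq] at heq
          exfalso
          apply absurd hop
          simp only [not_not, Bool.or_eq_true, beq_iff_eq]
          rw [← heq.2] at *
          tauto
        · exact h p c' hmem hdisj
      · exact fun h p c' hm hdisj => h p c' (List.mem_cons_of_mem _ hm) hdisj

-- ===== VERDICT (by name: the statement is the Claim_ definition above) =====
theorem is_valid_arithm_rule_spec : Claim_equal_is_valid_arithm_rule := by
  intro rule _
  unfold Spec_is_valid_arithm_rule is_valid_arithm_rule is_valid_arithm_rule_alt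
  rw [Bool.eq_iff_iff, pvALoopCh_iff, pvBLoop_iff]
  constructor
  · intro h p c hm hdisj
    refine h p c hm ?_
    rcases hdisj with h1 | h1 | h1 | h1 <;> simp [h1]
  · intro h p c hm hc
    refine h p c hm ?_
    rcases List.mem_cons.mp hc with h1 | h1
    · exact Or.inl h1
    rcases List.mem_cons.mp h1 with h2 | h2
    · exact Or.inr (Or.inl h2)
    rcases List.mem_cons.mp h2 with h3 | h3
    · exact Or.inr (Or.inr (Or.inl h3))
    rcases List.mem_cons.mp h3 with h4 | h4
    · exact Or.inr (Or.inr (Or.inr h4))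
    · cases h4
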